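-- pv_equiv track=rewrite | github.com/Vatsal216/crewgraph-ai | crewgraph_ai/ml/models/__init__.py | _find_common_sequence
-- ===== SOURCE A (Python) =====
-- from typing import Any, Dict, List, Optional, Tuple, Union
--
-- def _find_common_sequence(sequences: List[List[str]]) -> List[str]:
--     """Find common task sequence across executions."""
--     if not sequences:
--         return []
--
--     # Simple approach: find most common starting sequence
--     min_length = min(len(seq) for seq in sequences) if sequences else 0
--     common_sequence = []
--
--     for i in range(min_length):
--         task_at_pos = [seq[i] for seq in sequences if len(seq) > i]
--         if task_at_pos:
--             # Find most common task at this position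
--             most_common = max(set(task_at_pos), key=task_at_pos.count)
--             if task_at_pos.count(most_common) > len(sequences) * 0.5:
--                 common_sequence.append(most_common)
--             else:
--                 break
--
--     return common_sequence
-- ===== SOURCE B (Python) =====
-- def _find_common_sequence(sequences):
--     """Find common task sequence across executions."""
--     n = len(sequences)
--     prefix = []
--     # zip(*sequences) transposes: it yields exactly the columns 0..min_length-1
--     # (nothing when sequences is empty or some sequence is empty).
--     for col in zip(*sequences):
--         # Boyer-Moore majority vote: one pass, O(1) extra state.
--         candidate, votes = None, 0
--         for t in col:
--             if votes == 0:
--                 candidate, votes = t, 1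
--             elif t == candidate:
--                 votes += 1
--             else:
--                 votes -= 1
--         # Single verification count; append only on a strict majority.
--         if 2 * col.count(candidate) > n:
--             prefix.append(candidate)
--         else:
--             break
--     return prefix
-- ===== Notes on version B (the rewrite author's own statement) =====
-- stated objective: alternative
-- what changed: B transposes the input with zip(*sequences) and, for each column, picks the majority candidate by the Boyer-Moore voting pass plus one verification count, instead of A's per-index column rebuild and max(set(column), key=column.count) with a count scan per distinct task.
import Mathlib
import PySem

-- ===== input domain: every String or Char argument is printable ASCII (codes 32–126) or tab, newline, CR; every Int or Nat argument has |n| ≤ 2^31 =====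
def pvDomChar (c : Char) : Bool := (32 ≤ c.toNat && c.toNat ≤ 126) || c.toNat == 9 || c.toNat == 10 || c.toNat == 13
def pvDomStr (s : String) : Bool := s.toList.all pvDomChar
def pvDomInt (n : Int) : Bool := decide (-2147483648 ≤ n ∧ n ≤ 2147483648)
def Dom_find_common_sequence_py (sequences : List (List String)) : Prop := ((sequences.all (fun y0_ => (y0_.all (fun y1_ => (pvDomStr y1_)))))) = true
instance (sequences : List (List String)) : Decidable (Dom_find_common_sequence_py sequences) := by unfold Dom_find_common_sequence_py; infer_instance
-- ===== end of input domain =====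

-- B transposes the input with zip(*sequences) and, per column, runs the Boyer–Moore
-- majority-vote pass plus one verification count, instead of A's per-index column
-- rebuild and max(set, key=list.count) scans (objective: alternative; same value always).

-- ===== PORT A =====
-- Loop 'for i in range(min_length)' of A, with the early 'break' and the running
-- 'common_sequence' accumulator.  'task_at_pos.count(most_common) > len(sequences) * 0.5'
-- is ported as '2 * count > n', exact for integers.  'max(set(task_at_pos), key=...)' is
-- ported as max over PySem.Set.ofList; Python's set hash order is not modelled, but the
-- function's RESULT never depends on the tie choice (an element is appended only when it
-- holds a strict majority) — the proofs below establish exactly that.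
def pvALoop (sequences : List (List String)) (n m i : Nat) (acc : List String) : List String :=
  if _h : i < m then
    let task_at_pos := (sequences.filter (fun s => decide (s.length > i))).map
      (fun s => PySem.List.pyGetD s (i : Int) "")   -- seq[i]; in range thanks to the filter
    if task_at_pos ≠ [] then
      let most_common := (PySem.List.max? (PySem.Set.ofList task_at_pos)
        (fun x => task_at_pos.count x)).getD ""     -- nonempty, so max? is some
      if 2 * task_at_pos.count most_common > n then
        pvALoop sequences n m (i + 1) (acc ++ [most_common])
      else acc
    else pvALoop sequences n m (i + 1) acc
  else acc
termination_by m - i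

def find_common_sequence_py (sequences : List (List String)) : List String :=
  if sequences = [] then []
  else
    -- min(len(seq) for seq in sequences) if sequences else 0; nonempty here, so min? is some
    let min_length := if sequences ≠ [] then
        (PySem.List.min? (sequences.map (fun s => s.length)) (fun x => x)).getD 0
      else 0
    pvALoop sequences sequences.length min_length 0 []

-- ===== PORT B =====
-- 'zip(*sequences)': the list of columns 0..min_length-1; yields nothing as soon as the
-- argument list is empty or some sequence is exhausted (exactly Python's zip).
def pvZipStar (seqs : List (List String)) : List (List String) :=
  match seqs with
  | [] => []
  | s :: rest =>
    if (s :: rest).all (fun q => !q.isEmpty) then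
      (s :: rest).map (fun q => q.headD "")   -- all nonempty here, so headD hits the head
        :: pvZipStar ((s :: rest).map (fun q => q.tail))
    else []
termination_by (seqs.headD []).length
decreasing_by
  simp only [List.all_cons, Bool.and_eq_true, Bool.not_eq_true', List.isEmpty_eq_false_iff] at *
  simp only [List.map_cons, List.headD_cons]
  have : s ≠ [] := by tauto
  have := List.length_pos_iff.mpr this
  simp [List.length_tail]; omega

-- The inner 'for t in col' Boyer–Moore voting loop of Source B: state (candidate, votes).
def pvBMstep (sv : Option String × Nat) (t : String) : Option String × Nat :=
  if sv.2 = 0 then (some t, 1)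
  else if sv.1 = some t then (sv.1, sv.2 + 1)
  else (sv.1, sv.2 - 1)

def pvBM (col : List String) : Option String × Nat :=
  col.foldl pvBMstep ((none : Option String), 0)

-- 'col.count(candidate)' where candidate may still be None (Python: counts 0 then).
def pvCountOpt (col : List String) (c : Option String) : Nat :=
  match c with
  | none => 0
  | some x => col.count x

-- The outer 'for col in zip(*sequences)' loop of Source B with its break.
def pvBPick (n : Nat) : List (List String) → List String
  | [] => []
  | col :: rest =>
    if 2 * pvCountOpt col (pvBM col).1 > n then
      (pvBM col).1.getD "" :: pvBPick n rest   -- candidate is some here: the count is positive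
    else []

def find_common_sequence_py_alt (sequences : List (List String)) : List String :=
  pvBPick sequences.length (pvZipStar sequences)

-- ===== PRECONDITION & SPEC =====
def Spec_find_common_sequence_py (sequences : List (List String)) (out : List String) : Prop := out = find_common_sequence_py_alt sequences
instance (sequences : List (List String)) (out : List String) : Decidable (Spec_find_common_sequence_py sequences out) := by unfold Spec_find_common_sequence_py; infer_instance

-- ===== CLAIM (what is proved, stated in full; the proofs are below) =====
def Claim_equal_find_common_sequence_py : Prop := ∀ (sequences : List (List String)), Dom_find_common_sequence_py sequences → Spec_find_common_sequence_py sequences (find_common_sequence_py sequences)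

-- ===== LEMMAS AND PROOFS =====

-- Column i of the sequences (every sequence is long enough wherever this is used).
def pvCol (sequences : List (List String)) (i : Nat) : List String :=
  sequences.map (fun s => PySem.List.pyGetD s (i : Int) "")

-- Pairing invariant of the Boyer–Moore fold: counting the pre-votes v for the start
-- candidate c, any value x occurs at most (final votes, if x ends as candidate) plus
-- half of whatever got cancelled in pairs of distinct values.
theorem pv_bm_invariant (l : List String) (c : Option String) (v : Nat) (x : String) :
    2 * (l.count x + (if c = some x then v else 0)) + (l.foldl pvBMstep (c, v)).2
      ≤ 2 * (if (l.foldl pvBMstep (c, v)).1 = some x then (l.foldl pvBMstep (c, v)).2 else 0)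
          + l.length + v := by
  induction l generalizing c v with
  | nil =>
    simp only [List.foldl_nil, List.count_nil, List.length_nil, Nat.zero_add]
    split <;> omega
  | cons t r ih =>
    rw [List.foldl_cons]
    simp only [List.count_cons, List.length_cons, beq_iff_eq]
    by_cases hv : v = 0
    · subst hv
      rw [show pvBMstep (c, 0) t = (some t, 1) from by simp [pvBMstep]]
      have H := ih (some t) 1
      by_cases htx : t = x
      · rw [if_pos (by rw [htx] : some t = some x)] at H
        rw [if_pos htx]
        rcases eq_or_ne c (some x) with hcx | hcx
        · rw [if_pos hcx]; omega
        · rw [if_neg hcx]; omega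
      · rw [if_neg (fun h => htx (Option.some_inj.mp h))] at H
        rw [if_neg htx]
        rcases eq_or_ne c (some x) with hcx | hcx
        · rw [if_pos hcx]; omega
        · rw [if_neg hcx]; omega
    · by_cases hct : c = some t
      · rw [show pvBMstep (c, v) t = (c, v + 1) from by simp [pvBMstep, hv, hct]]
        have H := ih c (v + 1)
        by_cases hcx : c = some x
        · have htx : t = x := (Option.some_inj.mp (hcx.symm.trans hct)).symm
          rw [if_pos htx, if_pos hcx]
          rw [if_pos hcx] at H
          omega
        · have htx : t ≠ x := fun h => hcx (by rw [hct, h])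
          rw [if_neg htx, if_neg hcx]
          rw [if_neg hcx] at H
          omega
      · rw [show pvBMstep (c, v) t = (c, v - 1) from by simp [pvBMstep, hv, hct]]
        have H := ih c (v - 1)
        by_cases hcx : c = some x
        · have htx : t ≠ x := fun h => hct (by rw [hcx, h])
          rw [if_neg htx, if_pos hcx]
          rw [if_pos hcx] at H
          omega
        · rw [if_neg hcx]
          rw [if_neg hcx] at H
          by_cases htx : t = x
          · rw [if_pos htx]; omega
          · rw [if_neg htx]; omega

-- Boyer–Moore correctness: a strict-majority element is the surviving candidate.
theorem pv_bm_majority (l : List String) (x : String) (h : l.length < 2 * l.count x) :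
    (pvBM l).1 = some x := by
  by_contra hne
  have H := pv_bm_invariant l none 0 x
  unfold pvBM at hne
  rw [if_neg hne] at H
  simp at H
  omega

-- The transpose: zip(*seqs) is the list of the first-m columns, m the minimum length.
theorem pv_zipStar_eq (m : Nat) : ∀ (seqs : List (List String)), seqs ≠ [] →
    (∀ s ∈ seqs, m ≤ s.length) → (∃ s ∈ seqs, s.length = m) →
    pvZipStar seqs = (List.range m).map (pvCol seqs) := by
  induction m with
  | zero =>
    intro seqs hne _ hex
    obtain ⟨s0, hs0, hlen⟩ := hex
    have hempty : s0 = [] := List.length_eq_zero_iff.mp hlen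
    obtain ⟨a, rest, rfl⟩ := List.exists_cons_of_ne_nil hne
    rw [pvZipStar]
    have : ¬ ((a :: rest).all (fun q => !q.isEmpty)) = true := by
      simp only [List.all_eq_true]
      intro hall
      have := hall s0 hs0
      simp [hempty] at this
    simp [this]
  | succ m ih =>
    intro seqs hne hall hex
    obtain ⟨a, rest, rfl⟩ := List.exists_cons_of_ne_nil hne
    rw [pvZipStar]
    have hallne : ((a :: rest).all (fun q => !q.isEmpty)) = true := by
      simp only [List.all_eq_true]
      intro q hq
      have := hall q hq
      simp only [Bool.not_eq_true', List.isEmpty_eq_false_iff]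
      exact List.ne_nil_of_length_pos (by omega)
    rw [if_pos hallne]
    have hrec := ih ((a :: rest).map (fun q => q.tail)) (by simp)
      (by intro s hs
          obtain ⟨q, hq, rfl⟩ := List.mem_map.mp hs
          have := hall q hq
          simp [List.length_tail]; omega)
      (by obtain ⟨s0, hs0, hlen⟩ := hex
          exact ⟨s0.tail, List.mem_map.mpr ⟨s0, hs0, rfl⟩, by simp [List.length_tail, hlen]⟩)
    rw [hrec]
    -- columns of the tails are the shifted columns
    have hcolshift : ∀ i : Nat, pvCol ((a :: rest).map (fun q => q.tail)) i
        = pvCol (a :: rest) (i + 1) := by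
      intro i
      unfold pvCol
      rw [List.map_map]
      refine List.map_congr_left fun s _ => ?_
      simp only [Function.comp]
      rw [PySem.List.pyGetD_natCast, PySem.List.pyGetD_natCast]
      cases s with
      | nil => simp
      | cons b t => simp [List.getD]
    have hcol0 : (a :: rest).map (fun q => q.headD "") = pvCol (a :: rest) 0 := by
      unfold pvCol
      refine List.map_congr_left fun s _ => ?_
      rw [show ((0 : Nat) : Int) = (0 : Int) by norm_num, PySem.List.pyGetD_zero]
      cases s <;> simp [List.getD]
    rw [hcol0]
    rw [List.range_succ_eq_map]
    simp only [List.map_cons, List.map_map]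
    congr 1
    refine List.map_congr_left fun i _ => ?_
    show pvCol (List.map (fun q => q.tail) (a :: rest)) i = pvCol (a :: rest) (i + 1)
    exact hcolshift i

-- One position: A's decision at position i equals B's decision at column i, and the
-- loops then agree on the rest.
theorem pv_loop_eq (sequences : List (List String)) (hne : sequences ≠ [])
    (m : Nat) (hm : ∀ s ∈ sequences, m ≤ s.length) :
    ∀ (k i : Nat), m - i = k → ∀ (acc : List String),
      pvALoop sequences sequences.length m i acc
        = acc ++ pvBPick sequences.length ((List.range' i k).map (pvCol sequences)) := by
  intro k
  induction k with
  | zero =>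
    intro i hk acc
    have hge : ¬ i < m := by omega
    rw [pvALoop]
    simp [hge, pvBPick]
  | succ k ih =>
    intro i hk acc
    have hi : i < m := by omega
    have hfilter : sequences.filter (fun s => decide (s.length > i)) = sequences := by
      rw [List.filter_eq_self]
      intro s hs
      have := hm s hs
      simp; omega
    have hcolne : pvCol sequences i ≠ [] := by
      simp [pvCol, hne]
    set col := pvCol sequences i with hcol
    have hlen : col.length = sequences.length := by simp [hcol, pvCol]
    obtain ⟨a, ha⟩ := List.exists_mem_of_ne_nil col hcolne
    have hSne : PySem.Set.ofList col ≠ [] :=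
      List.ne_nil_of_mem ((PySem.Set.mem_ofList col a).mpr ha)
    obtain ⟨mc, hmc⟩ : ∃ mc, PySem.List.max? (PySem.Set.ofList col)
        (fun x => col.count x) = some mc := by
      cases hx : PySem.List.max? (PySem.Set.ofList col) (fun x => col.count x) with
      | none => exact absurd ((PySem.List.max?_eq_none_iff _ _).mp hx) hSne
      | some mc => exact ⟨mc, rfl⟩
    have hmc_max : ∀ y ∈ col, col.count y ≤ col.count mc := fun y hy =>
      PySem.List.max?_isMax hmc y ((PySem.Set.mem_ofList col y).mpr hy)
    -- unfold one step of each loop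
    rw [pvALoop]
    rw [List.range'_succ, List.map_cons]
    simp only [dif_pos hi, hfilter]
    rw [show (sequences.map (fun s => PySem.List.pyGetD s (i : Int) "")) = col from rfl]
    simp only [if_pos hcolne, hmc, Option.getD_some]
    rw [pvBPick, ← hcol]
    by_cases hmaj : 2 * col.count mc > sequences.length
    · -- strict majority: BM's candidate is that very element; both append it and continue
      have hcand : (pvBM col).1 = some mc := pv_bm_majority col mc (by omega)
      have hcnt : pvCountOpt col (pvBM col).1 = col.count mc := by
        rw [hcand]; rfl
      have hcond : 2 * pvCountOpt col (pvBM col).1 > sequences.length := by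
        rw [hcnt]; exact hmaj
      rw [if_pos hmaj, if_pos hcond, hcand]
      simp only [Option.getD_some]
      rw [ih (i + 1) (by omega) (acc ++ [mc])]
      simp
    · -- no element has a majority (mc maximises the count): both stop
      rw [if_neg hmaj]
      have hbno : ¬ 2 * pvCountOpt col (pvBM col).1 > sequences.length := by
        cases hc : (pvBM col).1 with
        | none => simp [pvCountOpt]
        | some c =>
          simp only [pvCountOpt]
          by_cases hmem : c ∈ col
          · have := hmc_max c hmem
            omega
          · rw [List.count_eq_zero_of_not_mem hmem]
            omega
      rw [if_neg hbno]
      simp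

-- ===== VERDICT (by name: the statement is the Claim_ definition above) =====
theorem find_common_sequence_py_spec : Claim_equal_find_common_sequence_py := by
  intro sequences _
  unfold Spec_find_common_sequence_py
  unfold find_common_sequence_py find_common_sequence_py_alt
  by_cases hne : sequences = []
  · simp [hne, pvZipStar, pvBPick]
  · simp only [hne, ne_eq, not_false_eq_true, if_true, if_false]
    set m := (PySem.List.min? (sequences.map (fun s => s.length)) (fun x => x)).getD 0 with hmdef
    have hmapne : sequences.map (fun s => s.length) ≠ [] := by simp [hne]
    obtain ⟨m0, hm0⟩ : ∃ m0, PySem.List.min? (sequences.map (fun s => s.length))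
        (fun x => x) = some m0 := by
      cases hx : PySem.List.min? (sequences.map (fun s => s.length)) (fun x => x) with
      | none => exact absurd ((PySem.List.min?_eq_none_iff _ _).mp hx) hmapne
      | some m0 => exact ⟨m0, rfl⟩
    have hmm0 : m = m0 := by rw [hmdef, hm0]; rfl
    have hm : ∀ s ∈ sequences, m ≤ s.length := by
      intro s hs
      have := PySem.List.min?_isMin hm0 s.length (List.mem_map.mpr ⟨s, hs, rfl⟩)
      simpa [hmm0] using this
    have hmex : ∃ s ∈ sequences, s.length = m := by
      have := PySem.List.min?_mem hm0
      obtain ⟨s, hs, hlen⟩ := List.mem_map.mp this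
      exact ⟨s, hs, by rw [hlen, hmm0]⟩
    rw [pv_zipStar_eq m sequences hne hm hmex]
    rw [pv_loop_eq sequences hne m hm m 0 (by omega) []]
    rw [List.range_eq_range']
    simp
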